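-- pv_equiv track=rewrite | github.com/AhmadKadour/BiDAF | preprocess.py | get_token_index_dict
-- ===== SOURCE A (Python) =====
-- def get_token_index_dict(context, tokens):
--     """
--     for mapping the span of the answer
--     from character based indexing on context
--     to tokens based indexing on tokens
--
--     Parameters
--     ----------
--     context : str
--         the original context text.
--     tokens : list of str
--         the tokens of the context.
--
--     Returns
--     -------
--     dictionary form int (the character index) to int (the token index).
--     or None if an error occurred
--     """
--     context = context.lower()
--
--     current_context_char_idx = 0
--
--     mapping = {}
--
--     try:
--         for i, token in enumerate(tokens):
--             accumulator = ""
--             current_token_char_idx = 0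
--
--             while (accumulator != token
--                    and current_token_char_idx < len(token)
--                    and current_context_char_idx < len(context)):
--
--                 if token[current_token_char_idx] == context[current_context_char_idx]:
--                     accumulator += context[current_context_char_idx]
--                     current_token_char_idx += 1
--
--                 mapping[current_context_char_idx] = i
--                 current_context_char_idx += 1
--
--             if accumulator != token or accumulator == "": return None
--
--         return mapping
--
--     except:
--         return None
-- ===== SOURCE B (Python) =====
-- def get_token_index_dict(context, tokens):
--     # single flat scan over the lowercased context with (token index, intra-token pos) state
--     if any(tok == "" for tok in tokens):
--         return None
--     context = context.lower()
--     mapping = {}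
--     t = 0
--     tpos = 0
--     for idx, ch in enumerate(context):
--         if t == len(tokens):
--             break
--         mapping[idx] = t
--         if ch == tokens[t][tpos]:
--             tpos += 1
--             if tpos == len(tokens[t]):
--                 t += 1
--                 tpos = 0
--     return mapping if t == len(tokens) else None
-- ===== Notes on version B (the rewrite author's own statement) =====
-- stated objective: alternative
-- what changed: Replaced A's per-token outer loop with an inner character-consuming while-loop (and its accumulator string rebuilt per token) by a single flat loop over the lowercased context that carries just a current token index and intra-token position, with an up-front empty-token check.
import Mathlib
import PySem

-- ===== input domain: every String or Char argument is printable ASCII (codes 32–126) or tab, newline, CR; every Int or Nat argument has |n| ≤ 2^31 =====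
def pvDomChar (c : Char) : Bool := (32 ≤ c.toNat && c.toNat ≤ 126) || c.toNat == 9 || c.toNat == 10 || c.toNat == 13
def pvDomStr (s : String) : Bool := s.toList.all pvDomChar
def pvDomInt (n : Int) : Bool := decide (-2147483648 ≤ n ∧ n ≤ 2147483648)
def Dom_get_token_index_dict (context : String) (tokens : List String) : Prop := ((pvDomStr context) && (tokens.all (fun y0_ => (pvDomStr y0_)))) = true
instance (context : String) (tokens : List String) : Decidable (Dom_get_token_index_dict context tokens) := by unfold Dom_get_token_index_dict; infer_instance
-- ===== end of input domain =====

-- B replaces A's per-token inner while-loop with a single flat scan over the context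
-- carrying (token index, intra-token position) state; same return value (objective: alternative decomposition).

-- ===== PORT A =====
-- inner while-loop of A: acc/tpos are accumulator/current_token_char_idx, cpos is
-- current_context_char_idx; returns (accumulator, remaining context, cpos, mapping)
def aInner (tok : List Char) (i : Int) : List Char → List Char → Nat → Int → PySem.Dict Int Int → List Char × List Char × Int × PySem.Dict Int Int
  | rest, acc, tpos, cpos, m =>
    if acc = tok ∨ tok.length ≤ tpos then (acc, rest, cpos, m)
    else
      match rest with
      | [] => (acc, [], cpos, m)
      | c :: rs =>
        if tok[tpos]? = some c then
          aInner tok i rs (acc ++ [c]) (tpos + 1) (cpos + 1) (PySem.Dict.insert m cpos i)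
        else
          aInner tok i rs acc tpos (cpos + 1) (PySem.Dict.insert m cpos i)

-- the 'for i, token in enumerate(tokens)' loop with early 'return None'
def aOuter : List String → Int → List Char → Int → PySem.Dict Int Int → Option (PySem.Dict Int Int)
  | [], _, _, _, m => some m
  | tok :: rest, i, ctx, cpos, m =>
    match aInner tok.toList i ctx [] 0 cpos m with
    | (acc, ctx', cpos', m') =>
      if acc ≠ tok.toList ∨ acc = [] then none
      else aOuter rest (i + 1) ctx' cpos' m'

def get_token_index_dict (context : String) (tokens : List String) : Option (List (Int × Int)) :=
  (aOuter tokens 0 (PySem.Str.lower context).toList 0 PySem.Dict.empty).map (fun d => d.items)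

-- ===== PORT B =====
-- the single flat loop of Source B: t = current token index, tpos = position inside tokens[t];
-- tokens[t][tpos] is ported via getD/getElem? (both guarded exactly as in Source B)
def bLoop (tokens : List String) : List Char → Int → Nat → Nat → PySem.Dict Int Int → Nat × PySem.Dict Int Int
  | [], _, t, _, m => (t, m)
  | c :: cs, idx, t, tpos, m =>
    if t = tokens.length then (t, m)
    else
      if (tokens.getD t "").toList[tpos]? = some c then
        if tpos + 1 = (tokens.getD t "").toList.length then
          bLoop tokens cs (idx + 1) (t + 1) 0 (PySem.Dict.insert m idx (t : Int))
        else bLoop tokens cs (idx + 1) t (tpos + 1) (PySem.Dict.insert m idx (t : Int))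
      else bLoop tokens cs (idx + 1) t tpos (PySem.Dict.insert m idx (t : Int))

def get_token_index_dict_alt (context : String) (tokens : List String) : Option (List (Int × Int)) :=
  if tokens.any (fun tok => tok = "") then none
  else
    let r := bLoop tokens (PySem.Str.lower context).toList 0 0 0 PySem.Dict.empty
    if r.1 = tokens.length then some r.2.items else none

-- ===== PRECONDITION & SPEC =====
def Spec_get_token_index_dict (context : String) (tokens : List String) (out : Option (List (Int × Int))) : Prop := out = get_token_index_dict_alt context tokens
instance (context : String) (tokens : List String) (out : Option (List (Int × Int))) : Decidable (Spec_get_token_index_dict context tokens out) := by unfold Spec_get_token_index_dict; infer_instance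

-- ===== CLAIM (what is proved, stated in full; the proofs are below) =====
def Claim_equal_get_token_index_dict : Prop := ∀ (context : String) (tokens : List String), Dom_get_token_index_dict context tokens → Spec_get_token_index_dict context tokens (get_token_index_dict context tokens)

-- ===== LEMMAS AND PROOFS =====

-- once all tokens are consumed, bLoop returns immediately
lemma bLoop_done (tokens : List String) (ctx : List Char) (idx : Int) (t tpos : Nat) (m : PySem.Dict Int Int)
    (h : t = tokens.length) : bLoop tokens ctx idx t tpos m = (t, m) := by
  cases ctx <;> simp [bLoop, h]

-- A returns None whenever some token is empty
lemma aOuter_none_of_mem_empty : ∀ (toks : List String) (i : Int) (ctx : List Char) (idx : Int) (m : PySem.Dict Int Int),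
    "" ∈ toks → aOuter toks i ctx idx m = none := by
  intro toks
  induction toks with
  | nil => intro _ _ _ _ h; simp at h
  | cons tk rest ih =>
    intro i ctx idx m h
    rcases List.mem_cons.mp h with h1 | h2
    · subst h1
      unfold aOuter aInner; simp
    · unfold aOuter
      split
      split
      · rfl
      · exact ih _ _ _ _ h2

-- one-step unfoldings of aInner
lemma aInner_exit (tok : List Char) (i : Int) (rest acc : List Char) (tpos : Nat) (cpos : Int) (m : PySem.Dict Int Int)
    (h : acc = tok ∨ tok.length ≤ tpos) : aInner tok i rest acc tpos cpos m = (acc, rest, cpos, m) := by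
  rw [aInner.eq_def]; simp [h]

lemma aInner_nil (tok : List Char) (i : Int) (acc : List Char) (tpos : Nat) (cpos : Int) (m : PySem.Dict Int Int)
    (h : ¬(acc = tok ∨ tok.length ≤ tpos)) : aInner tok i [] acc tpos cpos m = (acc, [], cpos, m) := by
  rw [aInner.eq_def]; simp [h]

lemma aInner_cons_hit (tok : List Char) (i : Int) (c : Char) (cs acc : List Char) (tpos : Nat) (cpos : Int) (m : PySem.Dict Int Int)
    (h : ¬(acc = tok ∨ tok.length ≤ tpos)) (hm : tok[tpos]? = some c) :
    aInner tok i (c :: cs) acc tpos cpos m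
      = aInner tok i cs (acc ++ [c]) (tpos + 1) (cpos + 1) (PySem.Dict.insert m cpos i) := by
  rw [aInner.eq_def]; simp [h, hm]

lemma aInner_cons_miss (tok : List Char) (i : Int) (c : Char) (cs acc : List Char) (tpos : Nat) (cpos : Int) (m : PySem.Dict Int Int)
    (h : ¬(acc = tok ∨ tok.length ≤ tpos)) (hm : ¬ tok[tpos]? = some c) :
    aInner tok i (c :: cs) acc tpos cpos m
      = aInner tok i cs acc tpos (cpos + 1) (PySem.Dict.insert m cpos i) := by
  rw [aInner.eq_def]; simp [h, hm]

-- main bridge: mid-token state correspondence between A's nested loops and B's flat loop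
lemma bridge : ∀ (ctx : List Char) (tokens : List String) (t tpos : Nat) (idx : Int) (m : PySem.Dict Int Int),
    t < tokens.length → tpos < (tokens.getD t "").toList.length →
    (∀ tok ∈ tokens, tok ≠ "") →
    (match aInner (tokens.getD t "").toList (t : Int) ctx ((tokens.getD t "").toList.take tpos) tpos idx m with
     | (acc, ctx', cpos', m') =>
       if acc ≠ (tokens.getD t "").toList ∨ acc = [] then none
       else aOuter (tokens.drop (t + 1)) ((t : Int) + 1) ctx' cpos' m')
    = (let r := bLoop tokens ctx idx t tpos m
       if r.1 = tokens.length then some r.2 else none) := by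
  intro ctx
  induction ctx with
  | nil =>
    intro tokens t tpos idx m ht htp hne
    have hacc : ¬((tokens.getD t "").toList.take tpos = (tokens.getD t "").toList ∨
        (tokens.getD t "").toList.length ≤ tpos) := by
      push_neg
      refine ⟨fun he => ?_, htp⟩
      have := congrArg List.length he
      rw [List.length_take] at this
      omega
    rw [aInner_nil _ _ _ _ _ _ hacc]
    have hne' : ¬ t = tokens.length := Nat.ne_of_lt ht
    have h1 : ¬ List.take tpos (tokens.getD t "").toList = (tokens.getD t "").toList :=
      fun he => hacc (Or.inl he)
    refine Eq.trans (b := (none : Option (PySem.Dict Int Int))) ?_ ?_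
    · exact if_pos (Or.inl h1)
    · exact (if_neg hne').symm
  | cons c cs ih =>
    intro tokens t tpos idx m ht htp hne
    have hacc : ¬((tokens.getD t "").toList.take tpos = (tokens.getD t "").toList ∨
        (tokens.getD t "").toList.length ≤ tpos) := by
      push_neg
      refine ⟨fun he => ?_, htp⟩
      have := congrArg List.length he
      rw [List.length_take] at this
      omega
    have htne : ¬ t = tokens.length := Nat.ne_of_lt ht
    by_cases hm : (tokens.getD t "").toList[tpos]? = some c
    · -- matching character
      have hc : (tokens.getD t "").toList[tpos] = c := by
        have := List.getElem?_eq_getElem htp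
        rw [this] at hm
        exact Option.some.inj hm
      have htake : (tokens.getD t "").toList.take tpos ++ [c]
          = (tokens.getD t "").toList.take (tpos + 1) := by
        rw [List.take_add_one, List.getElem?_eq_getElem htp, hc]
        rfl
      rw [aInner_cons_hit _ _ _ _ _ _ _ _ hacc hm, htake]
      by_cases hlast : tpos + 1 = (tokens.getD t "").toList.length
      · -- the current token is completed by this character
        have hfull : (tokens.getD t "").toList.take (tpos + 1) = (tokens.getD t "").toList := by
          rw [hlast, List.take_length]
        rw [aInner_exit _ _ _ _ _ _ _ (Or.inl hfull), hfull]
        have htoknil : (tokens.getD t "").toList ≠ [] := by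
          intro he
          rw [he] at htp
          simp at htp
        have hstep : bLoop tokens (c :: cs) idx t tpos m
            = bLoop tokens cs (idx + 1) (t + 1) 0 (PySem.Dict.insert m idx (t : Int)) := by
          rw [bLoop, if_neg htne, if_pos hm, if_pos hlast]
        refine Eq.trans (b := aOuter (tokens.drop (t + 1)) ((t : Int) + 1) cs (idx + 1)
            (PySem.Dict.insert m idx (t : Int))) ?_ ?_
        · refine if_neg ?_
          rintro (h | h)
          · exact h rfl
          · exact htoknil h
        · show _ = (let r := bLoop tokens (c :: cs) idx t tpos m
                    if r.1 = tokens.length then some r.2 else none)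
          rw [hstep]
          by_cases hT : t + 1 = tokens.length
          · have hdropnil : tokens.drop (t + 1) = [] := by
              rw [List.drop_eq_nil_iff]
              omega
            rw [hdropnil, bLoop_done _ _ _ _ _ _ hT]
            simp [aOuter, hT]
          · have ht1 : t + 1 < tokens.length := Nat.lt_of_le_of_ne ht hT
            have hdrop : tokens.drop (t + 1) = tokens.getD (t + 1) "" :: tokens.drop (t + 1 + 1) := by
              rw [List.drop_eq_getElem_cons ht1, List.getD_eq_getElem _ _ ht1]
            have hmem1 : tokens.getD (t + 1) "" ∈ tokens := by
              rw [List.getD_eq_getElem _ _ ht1]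
              exact List.getElem_mem ht1
            have hlen1 : 0 < (tokens.getD (t + 1) "").toList.length := by
              have h0 := hne _ hmem1
              rcases Nat.eq_zero_or_pos ((tokens.getD (t + 1) "").toList.length) with h | h
              · exact absurd (by simpa using List.eq_nil_of_length_eq_zero h) h0
              · exact h
            have hIH := ih tokens (t + 1) 0 (idx + 1) (PySem.Dict.insert m idx (t : Int)) ht1 hlen1 hne
            simp only [List.take_zero] at hIH
            rw [hdrop, aOuter]
            push_cast at hIH ⊢
            exact hIH
      · -- still inside the current token
        have htp1 : tpos + 1 < (tokens.getD t "").toList.length := Nat.lt_of_le_of_ne htp hlast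
        have hIH := ih tokens t (tpos + 1) (idx + 1) (PySem.Dict.insert m idx (t : Int)) ht htp1 hne
        rw [hIH]
        have hstep : bLoop tokens (c :: cs) idx t tpos m
            = bLoop tokens cs (idx + 1) t (tpos + 1) (PySem.Dict.insert m idx (t : Int)) := by
          rw [bLoop, if_neg htne, if_pos hm, if_neg hlast]
        rw [hstep]
    · -- non-matching character
      rw [aInner_cons_miss _ _ _ _ _ _ _ _ hacc hm]
      rw [ih tokens t tpos (idx + 1) (PySem.Dict.insert m idx (t : Int)) ht htp hne]
      have hstep : bLoop tokens (c :: cs) idx t tpos m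
          = bLoop tokens cs (idx + 1) t tpos (PySem.Dict.insert m idx (t : Int)) := by
        rw [bLoop, if_neg htne, if_neg hm]
      rw [hstep]

theorem get_token_index_dict_spec : Claim_equal_get_token_index_dict := by
  intro context tokens _
  unfold Spec_get_token_index_dict get_token_index_dict get_token_index_dict_alt
  by_cases hemp : tokens.any (fun tok => tok = "")
  · rw [if_pos hemp]
    have hm : "" ∈ tokens := by
      rcases List.any_eq_true.mp hemp with ⟨x, hx, hx2⟩
      simp at hx2
      rwa [hx2] at hx
    rw [aOuter_none_of_mem_empty _ _ _ _ _ hm]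
    rfl
  · rw [if_neg hemp]
    have hne : ∀ tok ∈ tokens, tok ≠ "" := by
      intro tok hmem he
      exact hemp (List.any_eq_true.mpr ⟨tok, hmem, by simp [he]⟩)
    cases tokens with
    | nil =>
      rcases (PySem.Str.lower context).toList with _ | ⟨c, cs⟩ <;> simp [aOuter, bLoop]
    | cons tk rest =>
      have h0 : 0 < (tk :: rest).length := Nat.succ_pos _
      have hlen0 : 0 < ((tk :: rest).getD 0 "").toList.length := by
        have htk := hne tk List.mem_cons_self
        rcases Nat.eq_zero_or_pos (((tk :: rest).getD 0 "").toList.length) with h | h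
        · exact absurd (by simpa using List.eq_nil_of_length_eq_zero h) htk
        · exact h
      have hB := bridge (PySem.Str.lower context).toList (tk :: rest) 0 0 0 PySem.Dict.empty h0 hlen0 hne
      simp only [List.take_zero, Nat.cast_zero, zero_add, List.getD_cons_zero,
        List.drop_succ_cons, List.drop_zero] at hB
      rw [aOuter]
      simp only [List.take_zero, Nat.cast_zero, zero_add, List.getD_cons_zero,
        List.drop_succ_cons, List.drop_zero] at hB ⊢
      rw [hB]
      by_cases hr : (bLoop (tk :: rest) (PySem.Str.lower context).toList 0 0 0 PySem.Dict.empty).1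
          = (tk :: rest).length <;> simp [hr]
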